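-- pv_equiv track=rewrite | github.com/every-algorithm/python | math/general_number_field_sieve.py | root_mod_p
-- ===== SOURCE A (Python) =====
-- def root_mod_p(poly, p):
--     """
--     Find a root of the polynomial modulo p by brute force.
--     """
--     for x in range(p):
--         val = 0
--         for coeff in poly:
--             val = (val * x + coeff) % p
--         if val == 0:
--             return x
--     return None
-- ===== SOURCE B (Python) =====
-- def root_mod_p(poly, p):
--     """
--     Find a root of the polynomial modulo p by brute force.
--     Scans range(p) with next() over a generator; each candidate is tested by
--     accumulating coeff * (running power of x mod p) over the reversed
--     coefficients and reducing the total once at the end.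
--     """
--     rev = poly[::-1]
--
--     def value(x):
--         total = 0
--         pw = 1
--         for c in rev:
--             total += c * pw
--             pw = pw * x % p
--         return total % p
--
--     return next((x for x in range(p) if value(x) == 0), None)
-- ===== Notes on version B (the rewrite author's own statement) =====
-- stated objective: alternative
-- what changed: Replaces A's explicit loop with a per-step Horner multiply-add-mod accumulator by a next()-over-generator scan whose test accumulates coeff * running-power-of-x-mod-p over the reversed coefficients and reduces the total once at the end.
import Mathlib
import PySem

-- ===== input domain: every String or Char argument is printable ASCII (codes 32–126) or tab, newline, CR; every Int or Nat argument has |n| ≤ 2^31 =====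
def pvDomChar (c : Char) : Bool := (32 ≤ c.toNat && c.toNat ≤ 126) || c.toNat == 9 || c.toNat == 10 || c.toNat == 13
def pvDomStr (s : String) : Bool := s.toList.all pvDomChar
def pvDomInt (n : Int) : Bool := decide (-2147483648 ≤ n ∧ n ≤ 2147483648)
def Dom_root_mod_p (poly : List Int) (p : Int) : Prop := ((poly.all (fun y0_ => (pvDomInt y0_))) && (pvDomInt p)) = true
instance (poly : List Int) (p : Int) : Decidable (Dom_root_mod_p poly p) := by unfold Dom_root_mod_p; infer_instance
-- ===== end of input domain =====

-- B replaces A's Horner multiply-add-mod loop by a find?-scan whose test accumulates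
-- coeff * running-power-of-x-mod-p over the reversed coefficients, reducing the total
-- once at the end (alternative decomposition, same cost).


-- ===== PORT A =====
-- inner loop of A: Horner accumulator, val = (val * x + coeff) % p
def hornerModEval (poly : List Int) (x p : Int) : Int :=
  poly.foldl (fun val coeff => PySem.Int.mod (val * x + coeff) p) 0

-- outer loop of A over the remaining range values, with early return
def rootLoopA (poly : List Int) (p : Int) : List Int → Option Int
  | [] => none
  | x :: rest => if hornerModEval poly x p = 0 then some x else rootLoopA poly p rest

def root_mod_p (poly : List Int) (p : Int) : Option Int :=
  rootLoopA poly p (PySem.List.pyRange 0 p 1)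

-- ===== PORT B =====
-- B's test: accumulate total += c * pw over rev = reversed(poly), with the
-- running power pw = pw * x % p, then reduce the total once at the end
def valueB (poly : List Int) (p x : Int) : Int :=
  PySem.Int.mod
    ((poly.reverse.foldl
        (fun (s : Int × Int) c => (s.1 + c * s.2, PySem.Int.mod (s.2 * x) p))
        (0, 1)).1) p

-- next((x for x in range(p) if value(x) == 0), None)
def root_mod_p_alt (poly : List Int) (p : Int) : Option Int :=
  (PySem.List.pyRange 0 p 1).find? (fun x => valueB poly p x == 0)

-- ===== PRECONDITION & SPEC =====
def Spec_root_mod_p (poly : List Int) (p : Int) (out : Option Int) : Prop := out = root_mod_p_alt poly p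
instance (poly : List Int) (p : Int) (out : Option Int) : Decidable (Spec_root_mod_p poly p out) := by unfold Spec_root_mod_p; infer_instance

-- ===== CLAIM =====
def Claim_equal_root_mod_p : Prop := ∀ (poly : List Int) (p : Int), Dom_root_mod_p poly p → Spec_root_mod_p poly p (root_mod_p poly p)

-- ===== LEMMAS AND PROOFS =====

-- plain (mod-free) Horner evaluation, initial accumulator a
def hornerPlain (x : Int) (l : List Int) (a : Int) : Int :=
  l.foldl (fun v c => v * x + c) a

-- A's inner loop reduces to the plain Horner value mod p
theorem hornerMod_eq (x p : Int) (hp : 0 < p) :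
    ∀ (l : List Int) (a : Int),
      l.foldl (fun val coeff => PySem.Int.mod (val * x + coeff) p) (a % p)
        = hornerPlain x l a % p := by
  intro l
  induction l with
  | nil => intro a; simp [hornerPlain]
  | cons c t ih =>
    intro a
    have h1 : (a % p * x + c) % p = (a * x + c) % p := by
      have ha : a % p ≡ a [ZMOD p] := Int.emod_emod_of_dvd a dvd_rfl
      exact (ha.mul_right x).add_right c
    simp only [List.foldl_cons, hornerPlain, PySem.Int.mod_eq_emod_of_pos hp]
    rw [h1]
    have := ih (a * x + c)
    simpa [hornerPlain, PySem.Int.mod_eq_emod_of_pos hp] using this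

-- plain power-sum accumulator: psum x l pw = Σ l[i] * pw * x^i
def psum (x : Int) : List Int → Int → Int
  | [], _ => 0
  | c :: t, pw => c * pw + psum x t (pw * x)

-- B's fold is congruent mod p to the plain accumulator
theorem fold_congr (x p : Int) (hp : 0 < p) :
    ∀ (l : List Int) (total pwP pw : Int), pwP ≡ pw [ZMOD p] →
      (l.foldl (fun (s : Int × Int) c => (s.1 + c * s.2, PySem.Int.mod (s.2 * x) p))
          (total, pwP)).1
        ≡ total + psum x l pw [ZMOD p] := by
  intro l
  induction l with
  | nil => intro total pwP pw _; simp [psum]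
  | cons c t ih =>
    intro total pwP pw hpw
    have hstep : PySem.Int.mod (pwP * x) p ≡ pw * x [ZMOD p] := by
      rw [PySem.Int.mod_eq_emod_of_pos hp]
      exact (Int.emod_emod_of_dvd _ dvd_rfl).trans (hpw.mul_right x)
    have := ih (total + c * pwP) (PySem.Int.mod (pwP * x) p) (pw * x) hstep
    simp only [List.foldl_cons, psum]
    calc (t.foldl (fun (s : Int × Int) c => (s.1 + c * s.2, PySem.Int.mod (s.2 * x) p))
            (total + c * pwP, PySem.Int.mod (pwP * x) p)).1
        ≡ total + c * pwP + psum x t (pw * x) [ZMOD p] := this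
      _ ≡ total + c * pw + psum x t (pw * x) [ZMOD p] :=
          Int.ModEq.add_right _ (Int.ModEq.add_left _ (hpw.mul_left c))
      _ = total + (c * pw + psum x t (pw * x)) := by ring

-- psum splits over append
theorem psum_append (x : Int) :
    ∀ (u v : List Int) (pw : Int),
      psum x (u ++ v) pw = psum x u pw + psum x v (pw * x ^ u.length) := by
  intro u
  induction u with
  | nil => intro v pw; simp [psum]
  | cons c t ih =>
    intro v pw
    simp only [List.cons_append, psum, ih, List.length_cons, pow_succ]
    ring_nf

-- Horner's value is the plain power sum of the reversed list
theorem horner_psum (x : Int) :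
    ∀ (l : List Int) (a : Int),
      hornerPlain x l a = a * x ^ l.length + psum x l.reverse 1 := by
  intro l
  induction l with
  | nil => intro a; simp [hornerPlain, psum]
  | cons c t ih =>
    intro a
    have hstep : hornerPlain x (c :: t) a = hornerPlain x t (a * x + c) := rfl
    rw [hstep, ih (a * x + c)]
    simp only [List.reverse_cons, psum_append, psum, List.length_cons,
      List.length_reverse, pow_succ]
    ring

-- the two tests agree for every x when 0 < p
theorem eval_eq (poly : List Int) (x p : Int) (hp : 0 < p) :
    hornerModEval poly x p = valueB poly p x := by
  have hA : hornerModEval poly x p = hornerPlain x poly 0 % p := by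
    have := hornerMod_eq x p hp poly 0
    simpa [hornerModEval, Int.zero_emod] using this
  have hB : valueB poly p x = (0 + psum x poly.reverse 1) % p := by
    unfold valueB
    rw [PySem.Int.mod_eq_emod_of_pos hp]
    exact fold_congr x p hp poly.reverse 0 1 1 Int.ModEq.rfl
  rw [hA, hB, horner_psum x poly 0]
  simp

-- A's early-return loop is exactly find? with B's test, pointwise
theorem loop_eq_find (poly : List Int) (p : Int) (hp : 0 < p) :
    ∀ (xs : List Int),
      rootLoopA poly p xs = xs.find? (fun x => valueB poly p x == 0) := by
  intro xs
  induction xs with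
  | nil => rfl
  | cons x rest ih =>
    simp only [rootLoopA, List.find?_cons]
    rw [eval_eq poly x p hp]
    by_cases h : valueB poly p x = 0
    · simp [h]
    · have hb : (valueB poly p x == 0) = false := by simpa using h
      rw [if_neg h, hb]
      exact ih

-- ===== VERDICT =====
theorem root_mod_p_spec : Claim_equal_root_mod_p := by
  intro poly p _
  unfold Spec_root_mod_p root_mod_p root_mod_p_alt
  by_cases hp : 0 < p
  · exact loop_eq_find poly p hp _
  · rw [PySem.List.pyRange_one_eq_nil (by omega)]
    rfl
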